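-- pv_equiv track=rewrite | github.com/saurabh-gandhi/portfolio-analyser | src/stock_aggregator.py | _best_sector
-- ===== SOURCE A (Python) =====
-- def _best_sector(sectors: list[str]) -> str:
--     sectors = [s for s in sectors if s and str(s) not in ("nan", "None", "")]
--     preferred = [s for s in sectors if s in {
--         "Financial Services", "Technology", "Consumer Cyclical", "Industrials",
--         "Basic Materials", "Healthcare", "Consumer Defensive", "Energy",
--         "Utilities", "Communication Services", "Real Estate", "Banks",
--         "Pharmaceuticals & Biotechnology", "Automobiles",
--     }]
--     return preferred[0] if preferred else (sectors[0] if sectors else "")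
-- ===== SOURCE B (Python) =====
-- _PREFERRED = {
--     "Financial Services", "Technology", "Consumer Cyclical", "Industrials",
--     "Basic Materials", "Healthcare", "Consumer Defensive", "Energy",
--     "Utilities", "Communication Services", "Real Estate", "Banks",
--     "Pharmaceuticals & Biotechnology", "Automobiles",
-- }
--
-- def _best_sector(sectors: list[str]) -> str:
--     # Rank every valid sector by (is-not-preferred, position) and take the
--     # lexicographic minimum: the smallest key is the first preferred sector
--     # if any exists, otherwise the first valid sector.
--     candidates = [(s not in _PREFERRED, i, s)
--                   for i, s in enumerate(sectors)
--                   if s and str(s) not in ("nan", "None", "")]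
--     return min(candidates)[2] if candidates else ""
-- ===== Notes on version B (the rewrite author's own statement) =====
-- stated objective: alternative
-- what changed: Instead of two staged filtered lists plus first-element indexing, B attaches a (not-preferred, position) key to every valid sector and returns the third component of the lexicographically minimum key tuple (Python min), which is the first preferred sector if any, else the first valid one.
import Mathlib
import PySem

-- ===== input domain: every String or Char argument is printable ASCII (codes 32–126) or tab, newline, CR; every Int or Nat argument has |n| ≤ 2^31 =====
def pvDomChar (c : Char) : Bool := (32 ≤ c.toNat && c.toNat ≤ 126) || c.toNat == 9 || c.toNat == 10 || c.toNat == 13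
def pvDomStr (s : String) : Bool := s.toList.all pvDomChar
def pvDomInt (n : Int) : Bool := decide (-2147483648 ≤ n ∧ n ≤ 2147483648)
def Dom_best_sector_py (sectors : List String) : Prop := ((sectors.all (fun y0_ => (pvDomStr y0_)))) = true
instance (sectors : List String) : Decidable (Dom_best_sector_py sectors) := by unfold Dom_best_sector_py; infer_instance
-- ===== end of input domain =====

-- B replaces A's two staged filters plus indexing by ranking each valid sector with a
-- (not-preferred, position) key and taking the lexicographic minimum (objective: alternative).


-- ===== PORT A =====
-- the preferred-sector set literal
def pvPreferredList : List String :=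
  ["Financial Services", "Technology", "Consumer Cyclical", "Industrials",
   "Basic Materials", "Healthcare", "Consumer Defensive", "Energy",
   "Utilities", "Communication Services", "Real Estate", "Banks",
   "Pharmaceuticals & Biotechnology", "Automobiles"]

-- `s and str(s) not in ("nan","None","")` for a str argument
def pvValid (s : String) : Bool :=
  !(s == "") && !(s == "nan" || s == "None" || s == "")

def best_sector_py (sectors : List String) : String :=
  let sectors' := sectors.filter pvValid
  let preferred := sectors'.filter (fun s => pvPreferredList.contains s)
  match preferred with
  | p :: _ => p
  | [] => match sectors' with
          | v :: _ => v
          | [] => ""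

-- ===== PORT B =====
-- Python tuple (bool, int, str) with `<`: lexicographic, False < True
def pvTLt (a b : Bool × Int × String) : Bool :=
  (a.1 == false && b.1 == true) ||
  (a.1 == b.1 && (decide (a.2.1 < b.2.1) ||
                  (a.2.1 == b.2.1 && decide (a.2.2 < b.2.2))))

-- the comprehension `[(s not in _PREFERRED, i, s) for i, s in enumerate(sectors) if <valid>]`,
-- ported by hand carrying the enumerate counter k (exact: k starts at 0 and counts every element)
def pvCandsFrom (k : Int) (l : List String) : List (Bool × Int × String) :=
  match l with
  | [] => []
  | s :: rest =>
      if pvValid s then (!(pvPreferredList.contains s), k, s) :: pvCandsFrom (k + 1) rest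
      else pvCandsFrom (k + 1) rest

def best_sector_py_alt (sectors : List String) : String :=
  match pvCandsFrom 0 sectors with
  | [] => ""
  | c :: cs => (cs.foldl (fun m y => if pvTLt y m then y else m) c).2.2  -- Python min: left fold, strict <

-- ===== PRECONDITION & SPEC =====
def Spec_best_sector_py (sectors : List String) (out : String) : Prop := out = best_sector_py_alt sectors
instance (sectors : List String) (out : String) : Decidable (Spec_best_sector_py sectors out) := by unfold Spec_best_sector_py; infer_instance

-- ===== CLAIM (what is proved, stated in full; the proofs are below) =====
def Claim_equal_best_sector_py : Prop := ∀ (sectors : List String), Dom_best_sector_py sectors → Spec_best_sector_py sectors (best_sector_py sectors)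

-- ===== LEMMAS AND PROOFS =====

-- every candidate index is ≥ the starting counter
theorem pvCandsFrom_lb (l : List String) (k : Int) :
    ∀ y ∈ pvCandsFrom k l, k ≤ y.2.1 := by
  induction l generalizing k with
  | nil => simp [pvCandsFrom]
  | cons s rest ih =>
      intro y hy
      by_cases hv : pvValid s
      · simp [pvCandsFrom, hv] at hy
        rcases hy with h | h
        · simp [h]
        · have := ih (k + 1) y h; omega
      · simp [pvCandsFrom, hv] at hy
        have := ih (k + 1) y hy; omega

-- candidate indices are strictly increasing
theorem pvCandsFrom_pairwise (l : List String) (k : Int) :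
    (pvCandsFrom k l).Pairwise (fun a b => a.2.1 < b.2.1) := by
  induction l generalizing k with
  | nil => simp [pvCandsFrom]
  | cons s rest ih =>
      by_cases hv : pvValid s
      · simp only [pvCandsFrom, hv, if_pos]
        refine List.Pairwise.cons ?_ (ih (k + 1))
        intro y hy
        have := pvCandsFrom_lb rest (k + 1) y hy
        simp; omega
      · simpa [pvCandsFrom, hv] using ih (k + 1)

-- the third projections of the candidates are exactly the valid sectors
theorem pvCandsFrom_map (l : List String) (k : Int) :
    (pvCandsFrom k l).map (·.2.2) = l.filter pvValid := by
  induction l generalizing k with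
  | nil => simp [pvCandsFrom]
  | cons s rest ih =>
      by_cases hv : pvValid s <;>
        simp [pvCandsFrom, hv, ih (k + 1)]

-- the false-ranked candidates are exactly the valid preferred sectors
theorem pvCandsFrom_map_pref (l : List String) (k : Int) :
    ((pvCandsFrom k l).filter (fun t => t.1 == false)).map (·.2.2) =
      (l.filter pvValid).filter (fun s => pvPreferredList.contains s) := by
  induction l generalizing k with
  | nil => simp [pvCandsFrom]
  | cons s rest ih =>
      have h := ih (k + 1)
      simp [List.filter_filter] at h
      by_cases hv : pvValid s
      · by_cases hp : s ∈ pvPreferredList <;> simp [pvCandsFrom, hv, hp, h]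
      · simp [pvCandsFrom, hv, h]

-- the min-fold picks the first false-ranked element, else keeps the head,
-- provided indices are strictly increasing
theorem pvMinFold_eq (cs : List (Bool × Int × String)) (m : Bool × Int × String)
    (hlt : ∀ y ∈ cs, m.2.1 < y.2.1)
    (hpw : cs.Pairwise (fun a b => a.2.1 < b.2.1)) :
    cs.foldl (fun m y => if pvTLt y m then y else m) m =
      match cs.filter (fun t => t.1 == false) with
      | p :: _ => if m.1 = false then m else p
      | [] => m := by
  induction cs generalizing m with
  | nil => simp
  | cons y rest ih =>
      have hmy : m.2.1 < y.2.1 := hlt y (by simp)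
      have hrest : ∀ z ∈ rest, y.2.1 < z.2.1 := by
        intro z hz; exact (List.pairwise_cons.mp hpw).1 z hz
      have hrest' : ∀ z ∈ rest, m.2.1 < z.2.1 := fun z hz => hlt z (by simp [hz])
      have hpw' : rest.Pairwise (fun a b => a.2.1 < b.2.1) := (List.pairwise_cons.mp hpw).2
      have h1 : ¬ (y.2.1 < m.2.1) := by omega
      have h2 : ¬ (y.2.1 = m.2.1) := by omega
      cases hm : m.1 <;> cases hy : y.1
      · -- m false, y false: y not < m (larger index), keep m
        have hstep : (if pvTLt y m = true then y else m) = m := by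
          simp [pvTLt, hy, hm, h1, h2]
        rw [List.foldl_cons, hstep, ih m hrest' hpw']
        simp only [List.filter_cons, show (y.1 == false) = true by simp [hy], if_pos]
        cases hf : rest.filter (fun t => t.1 == false) <;> simp [hm]
      · -- m false, y true: keep m
        have hstep : (if pvTLt y m = true then y else m) = m := by
          simp [pvTLt, hy, hm]
        rw [List.foldl_cons, hstep, ih m hrest' hpw']
        simp only [List.filter_cons, show (y.1 == false) = false by simp [hy],
          Bool.false_eq_true, if_false]
        cases hf : rest.filter (fun t => t.1 == false) <;> simp [hm]
      · -- m true, y false: take y; it is the first false element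
        have hstep : (if pvTLt y m = true then y else m) = y := by
          simp [pvTLt, hy, hm]
        rw [List.foldl_cons, hstep, ih y hrest hpw']
        simp only [List.filter_cons, show (y.1 == false) = true by simp [hy], if_pos]
        cases hf : rest.filter (fun t => t.1 == false) <;> simp [hy]
      · -- m true, y true: keep m, y filtered out
        have hstep : (if pvTLt y m = true then y else m) = m := by
          simp [pvTLt, hy, hm, h1, h2]
        rw [List.foldl_cons, hstep, ih m hrest' hpw']
        simp only [List.filter_cons, show (y.1 == false) = false by simp [hy],
          Bool.false_eq_true, if_false]
        cases hf : rest.filter (fun t => t.1 == false) <;> simp [hm]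

-- ===== VERDICT (by name: the statement is the Claim_ definition above) =====
theorem best_sector_py_spec : Claim_equal_best_sector_py := by
  intro sectors _
  unfold Spec_best_sector_py best_sector_py best_sector_py_alt
  dsimp only
  cases hC : pvCandsFrom 0 sectors with
  | nil =>
      have hF : sectors.filter pvValid = [] := by
        rw [← pvCandsFrom_map sectors 0, hC]; rfl
      simp [hF]
  | cons c cs =>
      have hpw := pvCandsFrom_pairwise sectors 0
      rw [hC] at hpw
      have hc := List.pairwise_cons.mp hpw
      show _ = (List.foldl (fun m y => if pvTLt y m then y else m) c cs).2.2
      rw [pvMinFold_eq cs c hc.1 hc.2]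
      have hmap : (c :: cs).map (·.2.2) = sectors.filter pvValid := by
        rw [← pvCandsFrom_map sectors 0, hC]
      have hmapp : ((c :: cs).filter (fun t => t.1 == false)).map (·.2.2) =
          (sectors.filter pvValid).filter (fun s => pvPreferredList.contains s) := by
        rw [← pvCandsFrom_map_pref sectors 0, hC]
      -- fold result over cs, head c re-expressed as the first false-ranked element of c :: cs
      have hbr : (match cs.filter (fun t => t.1 == false) with
            | p :: _ => if c.1 = false then c else p
            | [] => c) =
          (match (c :: cs).filter (fun t => t.1 == false) with
            | p :: _ => p
            | [] => c) := by
        cases hc1 : c.1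
        · rw [List.filter_cons, if_pos (by simp [hc1])]
          cases cs.filter (fun t => t.1 == false) <;> simp
        · rw [List.filter_cons]
          simp only [hc1, show ((true : Bool) == false) = false from rfl,
            Bool.false_eq_true, if_false]
          cases cs.filter (fun t => t.1 == false) <;> simp
      rw [hbr]
      cases hf : (c :: cs).filter (fun t => t.1 == false) with
      | nil =>
          have hpref : (sectors.filter pvValid).filter
              (fun s => pvPreferredList.contains s) = [] := by
            rw [← hmapp, hf]; rfl
          rw [hpref, ← hmap]
          simp
      | cons p ps =>
          have hpref : (sectors.filter pvValid).filter (fun s => pvPreferredList.contains s) =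
              p.2.2 :: ps.map (·.2.2) := by rw [← hmapp, hf]; rfl
          rw [hpref]
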